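-- pv_equiv track=rewrite | github.com/filipemtz/studies | leetcode/trees/958.CheckCompletenessofaBinaryTree_BFS.py | has_middle_nones
-- ===== SOURCE A (Python) =====
-- from typing import List
--
-- def has_middle_nones(lst: List) -> bool:
--     idx = len(lst) - 1
--
--     while (idx >= 0) and (lst[idx] is None):
--         idx -= 1
--
--     while (idx >= 0):
--         if lst[idx] is None:
--             return True
--         idx -= 1
--
--     return False
-- ===== SOURCE B (Python) =====
-- def has_middle_nones(lst):
--     seen_none = False
--     for x in lst:
--         if x is None:
--             seen_none = True
--         elif seen_none:
--             return True
--     return False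
-- ===== Notes on version B (the rewrite author's own statement) =====
-- stated objective: idiomatic
-- what changed: Single forward pass with a seen_none flag instead of first stripping trailing Nones backward and then re-scanning the remaining prefix backward.
import Mathlib
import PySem

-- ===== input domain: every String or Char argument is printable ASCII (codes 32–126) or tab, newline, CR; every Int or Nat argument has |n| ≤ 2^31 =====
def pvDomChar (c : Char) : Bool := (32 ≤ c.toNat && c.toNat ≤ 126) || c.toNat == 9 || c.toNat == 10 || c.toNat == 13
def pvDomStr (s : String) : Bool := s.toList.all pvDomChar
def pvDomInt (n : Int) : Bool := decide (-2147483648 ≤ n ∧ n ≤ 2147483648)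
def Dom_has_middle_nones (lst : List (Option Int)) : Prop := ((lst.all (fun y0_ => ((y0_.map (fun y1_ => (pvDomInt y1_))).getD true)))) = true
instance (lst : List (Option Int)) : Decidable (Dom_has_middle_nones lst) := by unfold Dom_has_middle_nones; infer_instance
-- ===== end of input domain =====

-- B: one forward pass with a seen_none flag, instead of A's two backward scans (objective: idiomatic).
-- ===== PORT A =====
-- first while loop: idx runs len-1 .. 0 while lst[idx] is None; n here is idx+1 (the loop guard idx >= 0 is n > 0,
-- so the Int index is represented by the Nat n; lst[idx] is always in range, getD's default is never used)
def aLoop1 (lst : List (Option Int)) : Nat → Nat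
  | 0 => 0
  | n + 1 => if lst.getD n (some 0) = none then aLoop1 lst n else n + 1

-- second while loop: scan idx .. 0, return True on the first None
def aLoop2 (lst : List (Option Int)) : Nat → Bool
  | 0 => false
  | n + 1 => if lst.getD n (some 0) = none then true else aLoop2 lst n

def has_middle_nones (lst : List (Option Int)) : Bool :=
  aLoop2 lst (aLoop1 lst lst.length)

-- ===== PORT B =====
-- the for-loop of Source B, carrying the seen_none flag
def bLoop (lst : List (Option Int)) (seen : Bool) : Bool :=
  match lst with
  | [] => false
  | x :: xs =>
    match x with
    | none => bLoop xs true
    | some _ => if seen then true else bLoop xs seen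

def has_middle_nones_alt (lst : List (Option Int)) : Bool :=
  bLoop lst false

-- ===== PRECONDITION & SPEC =====
def Spec_has_middle_nones (lst : List (Option Int)) (out : Bool) : Prop := out = has_middle_nones_alt lst
instance (lst : List (Option Int)) (out : Bool) : Decidable (Spec_has_middle_nones lst out) := by unfold Spec_has_middle_nones; infer_instance

-- ===== CLAIM (what is proved, stated in full; the proofs are below) =====
def Claim_equal_has_middle_nones : Prop := ∀ (lst : List (Option Int)), Dom_has_middle_nones lst → Spec_has_middle_nones lst (has_middle_nones lst)

-- ===== LEMMAS AND PROOFS =====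

theorem aLoop1_stable (xs : List (Option Int)) (y : Option Int) :
    ∀ n, n ≤ xs.length → aLoop1 (xs ++ [y]) n = aLoop1 xs n := by
  intro n
  induction n with
  | zero => intro _; rfl
  | succ k ih =>
    intro h
    have hk : k < xs.length := by omega
    simp only [aLoop1, List.getD_append _ _ _ _ hk]
    rw [ih (by omega)]

theorem aLoop2_stable (xs : List (Option Int)) (y : Option Int) :
    ∀ n, n ≤ xs.length → aLoop2 (xs ++ [y]) n = aLoop2 xs n := by
  intro n
  induction n with
  | zero => intro _; rfl
  | succ k ih =>
    intro h
    have hk : k < xs.length := by omega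
    simp only [aLoop2, List.getD_append _ _ _ _ hk]
    rw [ih (by omega)]

theorem aLoop1_le (lst : List (Option Int)) : ∀ n, aLoop1 lst n ≤ n := by
  intro n
  induction n with
  | zero => simp [aLoop1]
  | succ k ih =>
    simp only [aLoop1]
    split
    · omega
    · omega

-- aLoop2 over the full length is "some element is none"
theorem aLoop2_full (xs : List (Option Int)) :
    aLoop2 xs xs.length = xs.any (fun o => o.isNone) := by
  induction xs using List.reverseRecOn with
  | nil => rfl
  | append_singleton xs y ih =>
    have hlen : (xs ++ [y]).length = xs.length + 1 := by simp
    rw [hlen]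
    simp only [aLoop2]
    rw [List.getD_append_right _ _ _ _ (le_refl _)]
    rw [aLoop2_stable xs y xs.length (le_refl _), ih]
    cases y <;> simp

theorem A_snoc_none (xs : List (Option Int)) :
    has_middle_nones (xs ++ [none]) = has_middle_nones xs := by
  unfold has_middle_nones
  have hlen : (xs ++ [none]).length = xs.length + 1 := by simp
  rw [hlen]
  simp only [aLoop1]
  rw [List.getD_append_right _ _ _ _ (le_refl _)]
  rw [if_pos (by simp [List.getD])]
  rw [aLoop1_stable xs none xs.length (le_refl _)]
  rw [aLoop2_stable xs none _ (le_trans (aLoop1_le xs xs.length) (le_refl _))]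

theorem A_snoc_some (xs : List (Option Int)) (v : Int) :
    has_middle_nones (xs ++ [some v]) = xs.any (fun o => o.isNone) := by
  unfold has_middle_nones
  have hlen : (xs ++ [some v]).length = xs.length + 1 := by simp
  rw [hlen]
  have h1 : aLoop1 (xs ++ [some v]) (xs.length + 1) = xs.length + 1 := by
    simp only [aLoop1]
    rw [List.getD_append_right _ _ _ _ (le_refl _)]
    rw [if_neg (by simp [List.getD])]
  rw [h1]
  simp only [aLoop2]
  rw [List.getD_append_right _ _ _ _ (le_refl _)]
  rw [if_neg (by simp [List.getD])]
  rw [aLoop2_stable xs (some v) xs.length (le_refl _), aLoop2_full]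

theorem bLoop_snoc_none (xs : List (Option Int)) :
    ∀ seen, bLoop (xs ++ [none]) seen = bLoop xs seen := by
  induction xs with
  | nil => intro seen; rfl
  | cons x xs ih =>
    intro seen
    cases x with
    | none => simp only [List.cons_append, bLoop, ih]
    | some w => simp only [List.cons_append, bLoop, ih]

theorem bLoop_true_any (xs : List (Option Int)) :
    bLoop xs true = xs.any (fun o => o.isSome) := by
  induction xs with
  | nil => rfl
  | cons x xs ih => cases x <;> simp [bLoop, ih]

theorem bLoop_false_imp_any (xs : List (Option Int)) :
    bLoop xs false = true → xs.any (fun o => o.isNone) = true := by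
  induction xs with
  | nil => simp [bLoop]
  | cons x xs ih =>
    cases x with
    | none => intro _; simp
    | some w =>
      simp only [bLoop, if_neg (by simp : ¬ (false = true))]
      intro h
      simp [ih h]

theorem bLoop_snoc_some (xs : List (Option Int)) (v : Int) :
    bLoop (xs ++ [some v]) false = (xs.any (fun o => o.isNone) || bLoop xs false) := by
  induction xs with
  | nil => rfl
  | cons x xs ih =>
    cases x with
    | none =>
      simp only [List.cons_append, bLoop, bLoop_true_any, List.any_cons]
      simp [List.any_append]
    | some w =>
      simp only [List.cons_append, bLoop, if_neg (by simp : ¬ (false = true)), ih]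
      simp

theorem main_eq (lst : List (Option Int)) :
    has_middle_nones_alt lst = has_middle_nones lst := by
  induction lst using List.reverseRecOn with
  | nil => rfl
  | append_singleton xs y ih =>
    cases y with
    | none =>
      unfold has_middle_nones_alt at *
      rw [bLoop_snoc_none, A_snoc_none, ih]
    | some v =>
      unfold has_middle_nones_alt
      rw [bLoop_snoc_some, A_snoc_some]
      by_cases h : bLoop xs false = true
      · simp [h, bLoop_false_imp_any xs h]
      · simp [eq_false_of_ne_true h]


-- ===== VERDICT (by name: the statement is the Claim_ definition above) =====
theorem has_middle_nones_spec : Claim_equal_has_middle_nones := by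
  intro lst _
  unfold Spec_has_middle_nones
  exact (main_eq lst).symm
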